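-- pv_equiv track=rewrite | github.com/transferwise/hisel | notebooks/study/sphercodes/permutohedron.py | global_first_index
-- ===== SOURCE A (Python) =====
-- from typing import Optional, Set, Tuple, List
--
-- def first_index(
--         subset: Set[int],
--         permutation: List[int]
-- ):
--     m = 1
--     for k in range(len(permutation)):
--         if subset.issubset(set(permutation[:k+1])):
--             return m - len(subset)
--         m += 1
--     return m - len(subset)
--
-- def global_first_index(
--         subset: Set[int],
--         permutations: List[List[int]],
--         d: int,
-- ):
--     m = d
--     for permutation in permutations:
--         m_ = first_index(subset, permutation)
--         if m_ < m:
--             m = m_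
--     return m
-- ===== SOURCE B (Python) =====
-- def global_first_index(subset, permutations, d):
--     need = len(subset)
--     best = d
--     for perm in permutations:
--         if not subset:
--             cur = 1
--         else:
--             cur = len(perm) + 1 - need
--             seen = set()
--             for i, v in enumerate(perm):
--                 if v in subset:
--                     seen.add(v)
--                     if len(seen) == need:
--                         cur = i + 1 - need
--                         break
--         if cur < best:
--             best = cur
--     return best
-- ===== Notes on version B (the rewrite author's own statement) =====
-- stated objective: faster
-- what changed: A rebuilds set(permutation[:k+1]) and re-tests subset.issubset for every prefix length k; B makes one left-to-right pass per permutation, incrementally counting distinct subset members seen and stopping as soon as all of them are present.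
import Mathlib
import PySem

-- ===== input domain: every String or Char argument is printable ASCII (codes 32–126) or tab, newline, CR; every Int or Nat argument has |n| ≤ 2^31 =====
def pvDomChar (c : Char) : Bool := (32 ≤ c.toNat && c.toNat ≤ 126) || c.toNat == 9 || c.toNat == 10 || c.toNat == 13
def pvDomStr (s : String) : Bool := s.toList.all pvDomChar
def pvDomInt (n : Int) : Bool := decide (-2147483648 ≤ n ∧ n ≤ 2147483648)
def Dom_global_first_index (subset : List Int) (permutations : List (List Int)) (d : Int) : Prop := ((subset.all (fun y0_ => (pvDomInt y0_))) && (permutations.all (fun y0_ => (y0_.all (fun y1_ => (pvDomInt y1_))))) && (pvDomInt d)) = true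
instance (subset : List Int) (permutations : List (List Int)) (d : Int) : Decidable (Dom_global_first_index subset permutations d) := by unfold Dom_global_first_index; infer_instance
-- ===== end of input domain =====

-- B replaces A's per-permutation rescan of growing prefixes (set(perm[:k+1]) rebuilt at every k)
-- by one incremental left-to-right pass counting distinct subset members seen; objective: faster.

-- ===== PORT A =====
-- first_index: m = 1; for k in range(len(permutation)): if subset.issubset(set(permutation[:k+1])): return m - len(subset); m += 1; return m - len(subset)
def pvALoop (S : PySem.Set Int) (perm : List Int) : List Int → Int → Int
  | [], m => m - (S.length : Int)
  | k :: ks, m =>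
      if PySem.Set.issubset S (PySem.Set.ofList (PySem.List.slice perm (some 0) (some (k + 1)))) then
        m - (S.length : Int)
      else pvALoop S perm ks (m + 1)

def pvFirstIndexA (subset : List Int) (perm : List Int) : Int :=
  pvALoop (PySem.Set.ofList subset) perm (PySem.List.pyRange 0 (perm.length : Int) 1) 1

def global_first_index (subset : List Int) (permutations : List (List Int)) (d : Int) : Int :=
  permutations.foldl (fun m perm =>
    let m_ := pvFirstIndexA subset perm
    if m_ < m then m_ else m) d

-- ===== PORT B =====
-- one pass over perm: count distinct subset members seen; stop when all `need` are present.
def pvBScan (S : PySem.Set Int) (need : Int) (fallback : Int) : List Int → Int → PySem.Set Int → Int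
  | [], _, _ => fallback
  | v :: rest, i, seen =>
      if v ∈ S then
        let seen' := PySem.Set.add seen v
        if (seen'.length : Int) = need then i + 1 - need
        else pvBScan S need fallback rest (i + 1) seen'
      else pvBScan S need fallback rest (i + 1) seen

def pvFirstIndexB (subset : List Int) (perm : List Int) : Int :=
  let S := PySem.Set.ofList subset
  let need : Int := S.length
  if S.isEmpty then 1
  else pvBScan S need ((perm.length : Int) + 1 - need) perm 0 PySem.Set.empty

def global_first_index_alt (subset : List Int) (permutations : List (List Int)) (d : Int) : Int :=
  permutations.foldl (fun best perm =>
    let cur := pvFirstIndexB subset perm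
    if cur < best then cur else best) d

-- ===== PRECONDITION & SPEC =====
def Spec_global_first_index (subset : List Int) (permutations : List (List Int)) (d : Int) (out : Int) : Prop := out = global_first_index_alt subset permutations d
instance (subset : List Int) (permutations : List (List Int)) (d : Int) (out : Int) : Decidable (Spec_global_first_index subset permutations d out) := by unfold Spec_global_first_index; infer_instance

-- ===== CLAIM (what is proved, stated in full; the proofs are below) =====
def Claim_equal_global_first_index : Prop := ∀ (subset : List Int) (permutations : List (List Int)) (d : Int), Dom_global_first_index subset permutations d → Spec_global_first_index subset permutations d (global_first_index subset permutations d)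

-- ===== LEMMAS AND PROOFS =====

theorem pv_issubset_iff (S t : List Int) :
    PySem.Set.issubset S (PySem.Set.ofList t) = true ↔ ∀ x ∈ S, x ∈ t := by
  simp [PySem.Set.issubset, PySem.Set.contains, List.all_eq_true, PySem.Set.mem_ofList]

-- a proper (nodup) sub-collection of S misses some element of S
theorem pv_missing (S seen : List Int) (hndS : S.Nodup) (_hnd : seen.Nodup)
    (_hsub : ∀ x ∈ seen, x ∈ S) (hlt : seen.length < S.length) :
    ∃ x, x ∈ S ∧ x ∉ seen := by
  by_contra h
  push Not at h
  have hsp : S.Subperm seen := hndS.subperm (fun x hx => h x hx)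
  have := hsp.length_le
  omega

-- a nodup sub-collection of S of full size contains all of S
theorem pv_full (S seen : List Int) (hnd : seen.Nodup)
    (hsub : ∀ x ∈ seen, x ∈ S) (hlen : S.length ≤ seen.length) :
    ∀ x ∈ S, x ∈ seen := by
  have hsp : seen.Subperm S := hnd.subperm (fun x hx => hsub x hx)
  intro x hx
  exact (hsp.perm_of_length_le hlen).mem_iff.mpr hx

theorem pv_slice_take (perm : List Int) (k : Nat) :
    PySem.List.slice perm (some 0) (some ((k : Int) + 1)) = perm.take (k + 1) := by
  have h : ((k : Int) + 1) = ((k + 1 : Nat) : Int) := by push_cast; ring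
  rw [h, PySem.List.slice_zero_start, PySem.List.slice_to_natCast]

theorem pv_key (S : List Int) (hnd : S.Nodup) (perm : List Int) :
    ∀ (rest : List Int) (k : Nat) (seen : List Int),
      perm.drop k = rest → k ≤ perm.length →
      seen.Nodup → (∀ x, x ∈ seen ↔ x ∈ S ∧ x ∈ perm.take k) →
      seen.length < S.length →
      pvALoop S perm (PySem.List.pyRange (k : Int) (perm.length : Int) 1) ((k : Int) + 1) =
      pvBScan S (S.length : Int) ((perm.length : Int) + 1 - (S.length : Int)) rest (k : Int) seen := by
  intro rest
  induction rest with
  | nil =>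
    intro k seen hdrop hk _ _ _
    have hkn : k = perm.length := by
      have := List.drop_eq_nil_iff.mp hdrop
      omega
    subst hkn
    rw [PySem.List.pyRange_one_eq_nil (le_refl _)]
    simp [pvALoop, pvBScan]
  | cons v rest' ih =>
    intro k seen hdrop hk hndseen hinv hlt
    have hk1 : k < perm.length := by
      by_contra h
      push Not at h
      rw [List.drop_eq_nil_of_le h] at hdrop
      simp at hdrop
    have hd := List.drop_eq_getElem_cons hk1
    rw [hdrop] at hd
    have hvk : perm[k] = v := (List.cons.injEq _ _ _ _ ▸ hd).1.symm
    have hrest : perm.drop (k + 1) = rest' := ((List.cons.injEq _ _ _ _ ▸ hd).2).symm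
    have htake : perm.take (k + 1) = perm.take k ++ [v] := by
      rw [List.take_add_one]
      simp [List.getElem?_eq_getElem hk1, hvk]
    have hklt : (k : Int) < (perm.length : Int) := by exact_mod_cast hk1
    have hcast : ((k + 1 : Nat) : Int) = (k : Int) + 1 := by push_cast; ring
    rw [PySem.List.pyRange_one_cons hklt]
    have hsubS : ∀ x ∈ seen, x ∈ S := fun x hx => ((hinv x).mp hx).1
    -- the recursive applications of the induction hypothesis need these casts
    by_cases hv : v ∈ S
    · by_cases hvs : v ∈ seen
      · -- v already seen: neither side makes progress
        have hvtk : v ∈ perm.take k := ((hinv v).mp hvs).2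
        have hadd : PySem.Set.add seen v = seen := by simp [PySem.Set.add, PySem.Set.contains, hvs]
        obtain ⟨x, hxS, hxseen⟩ := pv_missing S seen hnd hndseen hsubS hlt
        have hC : PySem.Set.issubset S (PySem.Set.ofList (PySem.List.slice perm (some 0) (some ((k : Int) + 1)))) = false := by
          rw [pv_slice_take, Bool.eq_false_iff]
          intro hTrue
          have := (pv_issubset_iff S _).mp hTrue x hxS
          rw [htake] at this
          rcases List.mem_append.mp this with h1 | h1
          · exact hxseen ((hinv x).mpr ⟨hxS, h1⟩)
          · have : x = v := List.mem_singleton.mp h1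
            exact hxseen (this ▸ hvs)
        simp only [pvALoop, pvBScan, hC, Bool.false_eq_true, if_false, if_pos hv, hadd]
        have hlen : ¬ ((seen.length : Int) = (S.length : Int)) := by
          intro h; omega
        rw [if_neg hlen]
        have hinv' : ∀ x, x ∈ seen ↔ x ∈ S ∧ x ∈ perm.take (k + 1) := by
          intro x
          rw [htake]
          constructor
          · rintro hx
            exact ⟨((hinv x).mp hx).1, List.mem_append.mpr (Or.inl ((hinv x).mp hx).2)⟩
          · rintro ⟨hxS, hx⟩
            rcases List.mem_append.mp hx with h1 | h1
            · exact (hinv x).mpr ⟨hxS, h1⟩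
            · exact (List.mem_singleton.mp h1) ▸ hvs
        have := ih (k + 1) seen hrest (by omega) hndseen hinv' hlt
        rw [hcast] at this
        exact this
      · -- v newly seen
        have hadd : PySem.Set.add seen v = seen ++ [v] := by
          simp [PySem.Set.add, PySem.Set.contains, hvs]
        have hnd' : (seen ++ [v]).Nodup := by
          rw [List.nodup_append]
          refine ⟨hndseen, List.nodup_singleton v, ?_⟩
          intro a ha b hb heq
          exact hvs ((heq.trans (List.mem_singleton.mp hb)) ▸ ha)
        have hsub' : ∀ x ∈ seen ++ [v], x ∈ S := by
          intro x hx
          rcases List.mem_append.mp hx with h1 | h1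
          · exact hsubS x h1
          · exact (List.mem_singleton.mp h1) ▸ hv
        have hinv' : ∀ x, x ∈ seen ++ [v] ↔ x ∈ S ∧ x ∈ perm.take (k + 1) := by
          intro x
          rw [htake]
          constructor
          · intro hx
            rcases List.mem_append.mp hx with h1 | h1
            · exact ⟨((hinv x).mp h1).1, List.mem_append.mpr (Or.inl ((hinv x).mp h1).2)⟩
            · have hxv := List.mem_singleton.mp h1
              exact ⟨hxv ▸ hv, List.mem_append.mpr (Or.inr h1)⟩
          · rintro ⟨hxS, hx⟩
            rcases List.mem_append.mp hx with h1 | h1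
            · exact List.mem_append.mpr (Or.inl ((hinv x).mpr ⟨hxS, h1⟩))
            · exact List.mem_append.mpr (Or.inr h1)
        by_cases hfull : seen.length + 1 = S.length
        · -- completion point: both sides return k + 1 - |S|
          have hall : ∀ x ∈ S, x ∈ perm.take (k + 1) := by
            intro x hxS
            have hx := pv_full S (seen ++ [v]) hnd' hsub'
              (by simp only [List.length_append, List.length_cons, List.length_nil]; omega) x hxS
            exact ((hinv' x).mp hx).2
          have hC : PySem.Set.issubset S (PySem.Set.ofList (PySem.List.slice perm (some 0) (some ((k : Int) + 1)))) = true := by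
            rw [pv_slice_take]
            exact (pv_issubset_iff S _).mpr hall
          simp only [pvALoop, pvBScan, hC, if_true, if_pos hv, hadd]
          have hlen : (((seen ++ [v]).length : Nat) : Int) = (S.length : Int) := by
            simp only [List.length_append, List.length_cons, List.length_nil]
            omega
          rw [if_pos hlen]
        · -- still incomplete
          obtain ⟨x, hxS, hxseen⟩ := pv_missing S (seen ++ [v]) hnd hnd' hsub'
            (by simp only [List.length_append, List.length_cons, List.length_nil]; omega)
          have hC : PySem.Set.issubset S (PySem.Set.ofList (PySem.List.slice perm (some 0) (some ((k : Int) + 1)))) = false := by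
            rw [pv_slice_take, Bool.eq_false_iff]
            intro hTrue
            have := (pv_issubset_iff S _).mp hTrue x hxS
            exact hxseen ((hinv' x).mpr ⟨hxS, this⟩)
          simp only [pvALoop, pvBScan, hC, Bool.false_eq_true, if_false, if_pos hv, hadd]
          have hlen : ¬ ((((seen ++ [v]).length : Nat) : Int) = (S.length : Int)) := by
            simp only [List.length_append, List.length_cons, List.length_nil]
            omega
          rw [if_neg hlen]
          have := ih (k + 1) (seen ++ [v]) hrest (by omega) hnd' hinv'
            (by simp only [List.length_append, List.length_cons, List.length_nil]; omega)
          rw [hcast] at this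
          exact this
    · -- v not in the subset
      obtain ⟨x, hxS, hxseen⟩ := pv_missing S seen hnd hndseen hsubS hlt
      have hinv' : ∀ x, x ∈ seen ↔ x ∈ S ∧ x ∈ perm.take (k + 1) := by
        intro x
        rw [htake]
        constructor
        · intro hx
          exact ⟨((hinv x).mp hx).1, List.mem_append.mpr (Or.inl ((hinv x).mp hx).2)⟩
        · rintro ⟨hxS', hx⟩
          rcases List.mem_append.mp hx with h1 | h1
          · exact (hinv x).mpr ⟨hxS', h1⟩
          · exact absurd ((List.mem_singleton.mp h1) ▸ hxS') hv
      have hC : PySem.Set.issubset S (PySem.Set.ofList (PySem.List.slice perm (some 0) (some ((k : Int) + 1)))) = false := by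
        rw [pv_slice_take, Bool.eq_false_iff]
        intro hTrue
        have := (pv_issubset_iff S _).mp hTrue x hxS
        exact hxseen ((hinv' x).mpr ⟨hxS, this⟩)
      simp only [pvALoop, pvBScan, hC, Bool.false_eq_true, if_false, if_neg hv]
      have := ih (k + 1) seen hrest (by omega) hndseen hinv' hlt
      rw [hcast] at this
      exact this

theorem pv_perm_eq (subset perm : List Int) :
    pvFirstIndexA subset perm = pvFirstIndexB subset perm := by
  unfold pvFirstIndexA pvFirstIndexB
  set S := PySem.Set.ofList subset with hS
  by_cases hemp : S = []
  · rw [if_pos (by simp [hemp])]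
    rw [hemp]
    cases perm with
    | nil => simp [pvALoop, PySem.List.pyRange_one_eq_nil]
    | cons v rest =>
      have h0 : (0 : Int) < ((v :: rest).length : Int) := by
        simp only [List.length_cons]
        omega
      rw [PySem.List.pyRange_one_cons h0]
      simp [pvALoop, PySem.Set.issubset]
  · rw [if_neg (by simp [List.isEmpty_iff, hemp])]
    have h := pv_key S (PySem.Set.nodup_ofList subset) perm perm 0 []
      (by simp) (by omega) List.nodup_nil (by simp) (by
        cases hSS : S with
        | nil => exact absurd hSS hemp
        | cons a t => simp only [List.length_nil, List.length_cons]; omega)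
    simpa using h

-- ===== VERDICT (by name: the statement is the Claim_ definition above) =====
theorem global_first_index_spec : Claim_equal_global_first_index := by
  intro subset permutations d _
  unfold Spec_global_first_index global_first_index global_first_index_alt
  simp only [pv_perm_eq]
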